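-- pv_equiv track=rewrite | github.com/iredox10/budgetExtractor | admin_units.py | find_parent_code
-- ===== SOURCE A (Python) =====
-- def find_parent_code(unit_code: str, parent_codes: list[str]) -> str | None:
--     candidates = []
--     for parent in parent_codes:
--         prefix = parent.rstrip("0")
--         if prefix and unit_code.startswith(prefix):
--             candidates.append((len(prefix), parent))
--     if not candidates:
--         return None
--     return sorted(candidates, key=lambda item: item[0], reverse=True)[0][1]
-- ===== SOURCE B (Python) =====
-- def find_parent_code(unit_code: str, parent_codes: list[str]) -> str | None:
--     best_len = -1
--     best_parent = None
--     for parent in parent_codes: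
--         prefix = parent.rstrip("0")
--         if prefix and unit_code.startswith(prefix) and len(prefix) > best_len:
--             best_len = len(prefix)
--             best_parent = parent
--     return best_parent
-- ===== Notes on version B (the rewrite author's own statement) =====
-- stated objective: alternative
-- what changed: Replaced the candidates-list-plus-stable-reverse-sort with a single max-tracking pass that keeps the earliest longest prefix via a strict '>' update, eliminating the intermediate list and the sort.
import Mathlib
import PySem

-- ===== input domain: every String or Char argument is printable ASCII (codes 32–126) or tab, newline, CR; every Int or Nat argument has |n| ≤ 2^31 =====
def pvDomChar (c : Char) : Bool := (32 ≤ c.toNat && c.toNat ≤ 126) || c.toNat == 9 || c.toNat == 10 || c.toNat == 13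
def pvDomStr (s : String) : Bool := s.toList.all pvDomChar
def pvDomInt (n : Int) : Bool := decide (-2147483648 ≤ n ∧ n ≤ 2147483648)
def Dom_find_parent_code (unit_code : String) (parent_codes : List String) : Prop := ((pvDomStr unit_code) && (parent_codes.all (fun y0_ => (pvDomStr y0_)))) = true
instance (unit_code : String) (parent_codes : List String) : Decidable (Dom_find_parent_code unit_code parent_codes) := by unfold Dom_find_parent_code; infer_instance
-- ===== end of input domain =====

set_option maxHeartbeats 1000000


-- B replaces A's candidates-list + stable reverse sort by a single max-tracking pass (strict '>' keeps the earliest longest pfx); A and B agree everywhere.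

-- ===== PORT A =====
-- parent.rstrip("0"): drop trailing '0' characters (hand port; exact for the single-char strip set "0")
def pvRstrip0 (s : String) : String :=
  String.ofList ((s.toList.reverse.dropWhile (fun c => c == '0')).reverse)

def find_parent_code (unit_code : String) (parent_codes : List String) : Option String :=
  let candidates : List (Nat × String) :=
    parent_codes.foldl (fun acc parent =>
      let pfx := pvRstrip0 parent
      if pfx ≠ "" ∧ PySem.Str.startswith unit_code pfx then
        acc ++ [(pfx.length, parent)]
      else acc) []
  if candidates = [] then none
  else
    match PySem.List.sorted candidates (fun item => item.1) true with
    | m :: _ => some m.2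
    | [] => none

-- ===== PORT B =====
def find_parent_code_alt (unit_code : String) (parent_codes : List String) : Option String :=
  (parent_codes.foldl (fun (st : Int × Option String) parent =>
      let pfx := pvRstrip0 parent
      if pfx ≠ "" ∧ PySem.Str.startswith unit_code pfx ∧ (pfx.length : Int) > st.1 then
        ((pfx.length : Int), some parent)
      else st) (-1, none)).2

-- ===== PRECONDITION & SPEC =====
def Spec_find_parent_code (unit_code : String) (parent_codes : List String) (out : Option String) : Prop := out = find_parent_code_alt unit_code parent_codes
instance (unit_code : String) (parent_codes : List String) (out : Option String) : Decidable (Spec_find_parent_code unit_code parent_codes out) := by unfold Spec_find_parent_code; infer_instance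

-- ===== CLAIM (what is proved, stated in full; the proofs are below) =====
def Claim_equal_find_parent_code : Prop := ∀ (unit_code : String) (parent_codes : List String), Dom_find_parent_code unit_code parent_codes → Spec_find_parent_code unit_code parent_codes (find_parent_code unit_code parent_codes)

-- ===== LEMMAS AND PROOFS =====

-- running-max step over the candidates list (proof-only helper)
def pvStep (o : Option (Nat × String)) (x : Nat × String) : Option (Nat × String) :=
  match o with
  | none => some x
  | some b => if b.1 < x.1 then some x else some b

-- head of the stable reverse insertion sort = left-to-right running max with strict '<'
theorem head_sorted_rev (c : List (Nat × String)) :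
    (PySem.List.sorted c (fun p => p.1) true).head? = c.foldl pvStep none := by
  rw [PySem.List.sorted_rev_eq_foldl_insertBy]
  suffices h : ∀ (l : List (Nat × String)) (o : Option (Nat × String)),
      l.head? = o →
      (c.foldl (fun acc x => PySem.List.insertBy (fun a b => decide (b.1 < a.1)) x acc) l).head?
        = c.foldl pvStep o by
    exact h [] none rfl
  induction c with
  | nil => intro l o h; simpa using h
  | cons x xs ih =>
    intro l o h
    simp only [List.foldl_cons]
    apply ih
    cases l with
    | nil => simp [PySem.List.insertBy, pvStep, ← h]
    | cons y ys =>
      simp only [List.head?_cons] at h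
      subst h
      by_cases hc : y.1 < x.1 <;> simp [PySem.List.insertBy, pvStep, hc]

-- A's candidate-building fold and B's fold, named for the proofs
def pvAstep (unit_code : String) (acc : List (Nat × String)) (parent : String) : List (Nat × String) :=
  let pfx := pvRstrip0 parent
  if pfx ≠ "" ∧ PySem.Str.startswith unit_code pfx then
    acc ++ [(pfx.length, parent)]
  else acc

def pvBstep (unit_code : String) (st : Int × Option String) (parent : String) : Int × Option String :=
  let pfx := pvRstrip0 parent
  if pfx ≠ "" ∧ PySem.Str.startswith unit_code pfx ∧ (pfx.length : Int) > st.1 then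
    ((pfx.length : Int), some parent)
  else st

def pvRel (o : Option (Nat × String)) (st : Int × Option String) : Prop :=
  match o with
  | none => st = (-1, none)
  | some b => st = ((b.1 : Int), some b.2)

theorem astep_acc (u : String) (ps : List String) :
    ∀ acc, ps.foldl (pvAstep u) acc = acc ++ ps.foldl (pvAstep u) [] := by
  induction ps with
  | nil => simp
  | cons p rest ih =>
    intro acc
    simp only [List.foldl_cons]
    rw [ih (pvAstep u acc p), ih (pvAstep u [] p)]
    simp only [pvAstep]
    split
    · simp
    · simp

theorem inv (u : String) (ps : List String) :
    ∀ (o : Option (Nat × String)) (st : Int × Option String), pvRel o st →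
      pvRel ((ps.foldl (pvAstep u) []).foldl pvStep o) (ps.foldl (pvBstep u) st) := by
  induction ps with
  | nil => intro o st h; simpa using h
  | cons p rest ih =>
    intro o st h
    simp only [List.foldl_cons]
    rw [astep_acc, List.foldl_append]
    apply ih
    simp only [pvAstep, pvBstep]
    by_cases hc : pvRstrip0 p ≠ "" ∧ PySem.Str.startswith u (pvRstrip0 p)
    · rw [if_pos hc]
      cases o with
      | none =>
        simp only [pvRel] at h; subst h
        have hgt : ((pvRstrip0 p).length : Int) > ((-1 : Int), (none : Option String)).1 :=
          lt_of_lt_of_le (by norm_num) (Int.natCast_nonneg _)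
        rw [if_pos ⟨hc.1, hc.2, hgt⟩]
        simp only [List.nil_append, List.foldl_cons, List.foldl_nil, pvStep, pvRel]
      | some b =>
        simp only [pvRel] at h; subst h
        by_cases hlt : b.1 < (pvRstrip0 p).length
        · have hgt : ((pvRstrip0 p).length : Int) > (((b.1 : Int), some b.2) : Int × Option String).1 := by
            show ((pvRstrip0 p).length : Int) > (b.1 : Int)
            exact_mod_cast hlt
          rw [if_pos ⟨hc.1, hc.2, hgt⟩]
          simp only [List.nil_append, List.foldl_cons, List.foldl_nil, pvStep, if_pos hlt, pvRel]
        · have hngt : ¬ (pvRstrip0 p ≠ "" ∧ PySem.Str.startswith u (pvRstrip0 p) ∧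
              ((pvRstrip0 p).length : Int) > (((b.1 : Int), some b.2) : Int × Option String).1) := by
            rintro ⟨-, -, hgt⟩
            have hgt' : (b.1 : Int) < ((pvRstrip0 p).length : Int) := hgt
            exact hlt (by exact_mod_cast hgt')
          rw [if_neg hngt]
          simp only [List.nil_append, List.foldl_cons, List.foldl_nil, pvStep, if_neg hlt, pvRel]
    · rw [if_neg hc]
      have hc' : ¬ (pvRstrip0 p ≠ "" ∧ PySem.Str.startswith u (pvRstrip0 p) ∧
          ((pvRstrip0 p).length : Int) > st.1) := by
        rintro ⟨h1, h2, -⟩; exact hc ⟨h1, h2⟩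
      rw [if_neg hc']
      simpa using h

theorem find_parent_code_spec : Claim_equal_find_parent_code := by
  intro u ps _
  unfold Spec_find_parent_code find_parent_code find_parent_code_alt
  have hA : ps.foldl (fun acc parent =>
      let pfx := pvRstrip0 parent
      if pfx ≠ "" ∧ PySem.Str.startswith u pfx then acc ++ [(pfx.length, parent)]
      else acc) ([] : List (Nat × String)) = ps.foldl (pvAstep u) [] := rfl
  have hB : ps.foldl (fun (st : Int × Option String) parent =>
      let pfx := pvRstrip0 parent
      if pfx ≠ "" ∧ PySem.Str.startswith u pfx ∧ (pfx.length : Int) > st.1 then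
        ((pfx.length : Int), some parent)
      else st) (-1, none) = ps.foldl (pvBstep u) (-1, none) := rfl
  simp only [hA, hB]
  have hinv := inv u ps none (-1, none) (by simp [pvRel])
  have hhead := head_sorted_rev (ps.foldl (pvAstep u) [])
  by_cases hnil : ps.foldl (pvAstep u) [] = []
  · rw [if_pos hnil]
    rw [hnil] at hinv
    simp only [List.foldl_nil, pvRel] at hinv
    rw [hinv]
  · rw [if_neg hnil]
    have hs : PySem.List.sorted (ps.foldl (pvAstep u) []) (fun p => p.1) true ≠ [] := by
      rw [Ne, PySem.List.sorted_eq_nil_iff]; exact hnil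
    cases hsc : PySem.List.sorted (ps.foldl (pvAstep u) []) (fun p => p.1) true with
    | nil => exact absurd hsc hs
    | cons m t =>
      rw [hsc] at hhead
      simp only [List.head?_cons] at hhead
      rw [← hhead] at hinv
      simp only [pvRel] at hinv
      rw [hinv]
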